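-- pv_equiv track=rewrite | github.com/nguyentran6698/LC_Practice | codesignal/day3/2.py | solution
-- ===== SOURCE A (Python) =====
-- def solution(s):
--     def palindromePrefix(s,start,end):
--         if start == end:
--             return ''
--
--         for e in range(end,start + 1 , -1):
--             if s[start:e] == s[start:e][::-1]:
--                 return palindromePrefix(s,e,end)
--         return s[start:end]
--     return palindromePrefix(s,0,len(s))
-- ===== SOURCE B (Python) =====
-- def solution(s):
--     t = list(s)
--     while True:
--         best = 0
--         j = 0
--         rev = []
--         for c in t:
--             rev = [c] + rev
--             j += 1
--             if j >= 2 and t[:j] == rev: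
--                 best = j
--         if best == 0:
--             return ''.join(t)
--         t = t[best:]
-- ===== Notes on version B (the rewrite author's own statement) =====
-- stated objective: alternative
-- what changed: A recursively strips the longest palindromic prefix by slicing and reversing each candidate prefix in a descending scan with an early return; B is an iterative loop that, per round, makes one ascending pass over the remaining characters maintaining an incrementally built reversed prefix and keeping the maximal palindromic prefix length, then drops it.
import Mathlib
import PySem

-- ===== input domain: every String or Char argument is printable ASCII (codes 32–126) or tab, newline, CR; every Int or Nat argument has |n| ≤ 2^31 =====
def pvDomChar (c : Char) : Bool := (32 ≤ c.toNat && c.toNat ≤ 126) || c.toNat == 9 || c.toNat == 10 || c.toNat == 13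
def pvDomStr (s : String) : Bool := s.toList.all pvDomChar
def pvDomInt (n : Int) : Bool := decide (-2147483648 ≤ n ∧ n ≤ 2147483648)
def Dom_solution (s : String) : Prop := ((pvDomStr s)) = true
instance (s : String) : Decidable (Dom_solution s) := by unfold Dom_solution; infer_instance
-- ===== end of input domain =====

-- B replaces A's recursive descending slice-and-reverse search with an iterative one-pass-per-round
-- scan maintaining an incremental reversed prefix and keeping the maximal palindromic prefix length
-- (objective: alternative).

-- ===== PORT A =====
-- inner helper palindromePrefix(s, start, end); the for-loop with early return is the first hit
-- of find? over range(end, start+1, -1); s[start:e][::-1] is reversal (PySem.List.slice?_none_none_neg_one).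
def palA (s : List Char) (start e_end : Int) : List Char :=
  if start = e_end then []
  else
    match h : (PySem.List.pyRange e_end (start + 1) (-1)).find?
        (fun e => PySem.List.slice s (some start) (some e)
                    == (PySem.List.slice s (some start) (some e)).reverse) with
    | some e => palA s e e_end
    | none => PySem.List.slice s (some start) (some e_end)
termination_by (e_end - start).toNat
decreasing_by
  have hm := List.mem_of_find?_eq_some h
  rw [PySem.List.mem_pyRange_neg_one] at hm
  omega

def solution (s : String) : String := String.ofList (palA s.toList 0 (PySem.Str.len s))

-- ===== PORT B =====
-- one pass of the inner for-loop: state (rev, j, best)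
def stepB (t : List Char) (st : List Char × Nat × Nat) (c : Char) : List Char × Nat × Nat :=
  let rev := c :: st.1
  let j := st.2.1 + 1
  if 2 ≤ j ∧ t.take j = rev then (rev, j, j) else (rev, j, st.2.2)

def findBest (t : List Char) : Nat := (t.foldl (stepB t) ([], 0, 0)).2.2

def stripB (t : List Char) : List Char :=
  let best := findBest t
  if h : best = 0 then t else stripB (t.drop best)
termination_by t.length
decreasing_by
  by_cases ht : t = []
  · subst ht; exact absurd rfl h
  · have : 1 ≤ t.length := by cases t <;> simp_all
    simp only [List.length_drop]; omega

def solution_alt (s : String) : String := String.ofList (stripB s.toList)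

-- ===== PRECONDITION & SPEC =====
def Spec_solution (s : String) (out : String) : Prop := out = solution_alt s
instance (s : String) (out : String) : Decidable (Spec_solution s out) := by unfold Spec_solution; infer_instance

-- ===== CLAIM (what is proved, stated in full; the proofs are below) =====
def Claim_equal_solution : Prop := ∀ (s : String), Dom_solution s → Spec_solution s (solution s)

-- ===== LEMMAS AND PROOFS =====

-- the ascending update A's and B's searches both compute the largest palindromic prefix length with
def updB (t : List Char) (b j : Nat) : Nat :=
  if 2 ≤ j ∧ t.take j = (t.take j).reverse then j else b

lemma fold_stepB (t : List Char) : ∀ (r p : List Char) (b : Nat), p ++ r = t →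
    (r.foldl (stepB t) (p.reverse, p.length, b)).2.2
      = (List.range' (p.length + 1) r.length).foldl (updB t) b := by
  intro r
  induction r with
  | nil => intro p b _; simp
  | cons c r ih =>
    intro p b hpt
    have htake : t.take (p.length + 1) = p ++ [c] := by
      rw [← hpt]
      rw [show p ++ c :: r = (p ++ [c]) ++ r by simp]
      rw [List.take_append_of_le_length (by simp)]
      simp
    have hstep : stepB t (p.reverse, p.length, b) c
        = ((p ++ [c]).reverse, (p ++ [c]).length, updB t b (p.length + 1)) := by
      simp only [stepB, updB, htake]
      simp only [List.reverse_append, List.reverse_cons, List.reverse_nil, List.nil_append,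
        List.cons_append, List.length_append, List.length_cons, List.length_nil]
      split_ifs <;> simp
    simp only [List.foldl_cons, hstep]
    rw [ih (p ++ [c]) _ (by simpa using hpt)]
    simp [List.range'_succ]

lemma findBest_eq (t : List Char) :
    findBest t = (List.range' 1 t.length).foldl (updB t) 0 := by
  have := fold_stepB t t [] 0 (by simp)
  simpa [findBest] using this

lemma foldl_updB_bounds (t : List Char) (m : Nat) :
    (List.range' 1 m).foldl (updB t) 0 ≤ m ∧
      ((List.range' 1 m).foldl (updB t) 0 ≠ 0 → 2 ≤ (List.range' 1 m).foldl (updB t) 0) := by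
  induction m with
  | zero => simp
  | succ m ih =>
    rw [List.range'_1_concat, List.foldl_append]
    simp only [List.foldl_cons, List.foldl_nil, updB]
    split_ifs with hc
    · omega
    · omega

lemma findA (s : List Char) (start : Nat) : ∀ (m : Nat),
    (PySem.List.pyRange ((start : Int) + m) ((start : Int) + 1) (-1)).find?
        (fun e => PySem.List.slice s (some (start : Int)) (some e)
                    == (PySem.List.slice s (some (start : Int)) (some e)).reverse)
      = (if (List.range' 1 m).foldl (updB (s.drop start)) 0 = 0 then none
         else some ((start : Int) + (List.range' 1 m).foldl (updB (s.drop start)) 0)) := by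
  intro m
  induction m with
  | zero => rw [PySem.List.pyRange_neg_one_eq_nil (by omega)]; simp
  | succ m ih =>
    have hsl : PySem.List.slice s (some (start : Int)) (some ((start : Int) + ((m + 1 : Nat) : Int)))
        = (s.drop start).take (m + 1) := by
      have hc : ((start : Int) + ((m + 1 : Nat) : Int)) = (((start + (m + 1) : Nat)) : Int) := by
        push_cast; ring
      rw [hc, PySem.List.slice_natCast]
      congr 1
      omega
    rcases Nat.eq_zero_or_pos m with hm | hm
    · subst hm
      rw [PySem.List.pyRange_neg_one_eq_nil (by push_cast; omega)]
      simp [List.range'_one, updB]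
    · rw [PySem.List.pyRange_neg_one_cons (by push_cast; omega)]
      rw [List.find?_cons]
      have htail : (start : Int) + ((m + 1 : Nat) : Int) - 1 = (start : Int) + (m : Nat) := by
        push_cast; ring
      rw [htail, ih]
      rw [List.range'_1_concat, List.foldl_append]
      simp only [List.foldl_cons, List.foldl_nil, Nat.add_comm 1 m]
      by_cases hp : (s.drop start).take (m + 1) = ((s.drop start).take (m + 1)).reverse
      · have hcond : (PySem.List.slice s (some (start : Int)) (some ((start : Int) + ((m + 1 : Nat) : Int)))
            == (PySem.List.slice s (some (start : Int)) (some ((start : Int) + ((m + 1 : Nat) : Int)))).reverse) = true := by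
          rw [hsl, beq_iff_eq]; exact hp
        simp only [hcond]
        have hupd : updB (s.drop start) ((List.range' 1 m).foldl (updB (s.drop start)) 0) (m + 1)
            = m + 1 := by
          unfold updB
          rw [if_pos ⟨by omega, hp⟩]
        rw [hupd]
        simp
      · have hcond : (PySem.List.slice s (some (start : Int)) (some ((start : Int) + ((m + 1 : Nat) : Int)))
            == (PySem.List.slice s (some (start : Int)) (some ((start : Int) + ((m + 1 : Nat) : Int)))).reverse) = false := by
          rw [beq_eq_false_iff_ne, hsl]; exact hp
        simp only [hcond]
        have hupd : updB (s.drop start) ((List.range' 1 m).foldl (updB (s.drop start)) 0) (m + 1)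
            = (List.range' 1 m).foldl (updB (s.drop start)) 0 := by
          unfold updB
          rw [if_neg (fun hh => hp hh.2)]
        rw [hupd]

lemma main_lemma (s : List Char) : ∀ (k start : Nat), s.length - start ≤ k → start ≤ s.length →
    palA s start (s.length : Int) = stripB (s.drop start) := by
  intro k
  induction k with
  | zero =>
    intro start hk hle
    have h0 : start = s.length := by omega
    subst h0
    rw [palA, if_pos (by norm_num)]
    rw [stripB]
    simp [List.drop_length, findBest]
  | succ k ih =>
    intro start hk hle
    by_cases hse : start = s.length
    · subst hse
      rw [palA, if_pos (by norm_num)]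
      rw [stripB]
      simp [List.drop_length, findBest]
    · have hlt : start < s.length := lt_of_le_of_ne hle hse
      have hend : (s.length : Int) = (start : Int) + ((s.length - start : Nat) : Int) := by
        omega
      set m := s.length - start with hm
      have hlen : (s.drop start).length = m := by simp [hm]
      rw [palA, if_neg (by omega)]
      rw [hend, findA s start m]
      set F := (List.range' 1 m).foldl (updB (s.drop start)) 0 with hF
      have hb := foldl_updB_bounds (s.drop start) m
      rw [← hF] at hb
      have hfb : findBest (s.drop start) = F := by
        rw [findBest_eq, hlen, hF]
      by_cases hF0 : F = 0
      · rw [if_pos hF0]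
        rw [stripB, hfb]
        simp only [hF0, dif_pos]
        have : PySem.List.slice s (some (start : Int)) (some ((start : Int) + (m : Int)))
            = (s.drop start).take m := by
          have hc : ((start : Int) + (m : Int)) = (((start + m : Nat)) : Int) := by push_cast; ring
          rw [hc, PySem.List.slice_natCast]
          congr 1
          omega
        rw [this, ← hlen, List.take_length]
      · rw [if_neg hF0]
        have h2F : 2 ≤ F := hb.2 hF0
        have hFm : F ≤ m := hb.1
        have hcast : (start : Int) + (F : Int) = (((start + F : Nat)) : Int) := by push_cast; ring
        rw [hcast, ← hend]
        show palA s (((start + F : Nat)) : Int) ((s.length : Nat) : Int) = stripB (List.drop start s)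
        rw [ih (start + F) (by omega) (by omega)]
        conv_rhs => rw [stripB]
        rw [hfb]
        simp only [hF0, dif_neg, not_false_iff]
        rw [List.drop_drop, Nat.add_comm start F]

-- ===== VERDICT (by name: the statement is the Claim_ definition above) =====
theorem solution_spec : Claim_equal_solution := by
  unfold Claim_equal_solution Spec_solution
  intro s _
  unfold solution solution_alt
  congr 1
  have h := main_lemma s.toList s.toList.length 0 (by omega) (by omega)
  simp only [Nat.cast_zero, List.drop_zero] at h
  rw [← h]
  have hlen2 : PySem.Str.len s = (s.toList.length : Int) := by simp [pysem]
  rw [hlen2]
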